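-- pv_equiv track=rewrite | github.com/nicolels1/projetodessoft1- | funcoes.py | calcula_pontos_sequencia_alta
-- ===== SOURCE A (Python) =====
-- def  calcula_pontos_sequencia_alta(dados):
--     sequencia_alta = False
--     if len(dados) >= 4:
--         sequencia = []
--         copia_dados = []
--         for num in dados:
--             copia_dados.append(num)
--
--         while len(copia_dados) != 0:
--             menor_num = 10000
--             for num in copia_dados:
--                 if num <= menor_num:
--                     menor_num = num
--
--             if menor_num not in sequencia:
--                 sequencia.append(menor_num)
--
--             copia_dados.remove(menor_num)
--
--         for i in range(len(sequencia) - 4):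
--             if sequencia[i + 1] == sequencia[i] + 1 and sequencia[i + 2] == sequencia[i] + 2 and sequencia[i + 3] == sequencia[i] + 3 and sequencia[i + 4] == sequencia[i] + 4:
--                 sequencia_alta = True
--                 break
--
--     if sequencia_alta:
--         return 30
--     else:
--         return 0
-- ===== SOURCE B (Python) =====
-- def calcula_pontos_sequencia_alta(dados):
--     s = set(dados)
--     for v in s:
--         if v + 1 in s and v + 2 in s and v + 3 in s and v + 4 in s:
--             return 30
--     return 0
-- ===== Notes on version B (the rewrite author's own statement) =====
-- stated objective: faster
-- what changed: Replaces the quadratic repeated-minimum extraction (selection sort with dedup) plus windowed scan by a single hash-set membership test for v+1..v+4 over each distinct value; A's ValueError inputs (an element above the sentinel 10000 with len>=4) are excluded by Pre_.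
import Mathlib
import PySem

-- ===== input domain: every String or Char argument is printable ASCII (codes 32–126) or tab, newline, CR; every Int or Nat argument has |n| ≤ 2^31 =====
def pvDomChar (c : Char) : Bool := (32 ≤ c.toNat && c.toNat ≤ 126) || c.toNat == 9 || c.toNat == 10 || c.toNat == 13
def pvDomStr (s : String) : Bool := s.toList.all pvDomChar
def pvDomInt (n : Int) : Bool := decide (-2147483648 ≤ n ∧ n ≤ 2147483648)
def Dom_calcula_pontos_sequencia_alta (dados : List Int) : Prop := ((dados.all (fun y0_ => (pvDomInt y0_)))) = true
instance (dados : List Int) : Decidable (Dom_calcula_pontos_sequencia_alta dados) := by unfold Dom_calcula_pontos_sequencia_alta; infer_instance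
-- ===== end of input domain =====

-- B replaces A's quadratic repeated-minimum extraction by one set of the values
-- and a membership test for v+1..v+4 at each distinct value (objective: faster).

-- ===== PORT A =====
-- the inner 'for num in copia_dados: if num <= menor_num: menor_num = num' pass (sentinel 10000)
def pvMenor (l : List Int) : Int :=
  l.foldl (fun m n => if n ≤ m then n else m) 10000

-- termination helper for the while loop (cited by pvLoopA's decreasing_by)
theorem pv_remove?_length {xs r : List Int} {v : Int}
    (h : PySem.List.remove? xs v = some r) : r.length < xs.length := by
  have hv : v ∈ xs := by
    by_contra hnv
    rw [(PySem.List.remove?_eq_none_iff xs v).mpr hnv] at h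
    cases h
  rw [PySem.List.remove?_eq_some_erase xs v hv] at h
  cases h
  have := List.length_erase_of_mem hv
  have : 0 < xs.length := List.length_pos_of_mem hv
  omega

-- the 'while len(copia_dados) != 0' loop; the 'none' branch is where Python's
-- list.remove raises ValueError (excluded by Pre_)
def pvLoopA : List Int → List Int → List Int
  | [], seq => seq
  | c :: cs, seq =>
    let m := pvMenor (c :: cs)
    let seq' := if m ∈ seq then seq else seq ++ [m]
    match h : PySem.List.remove? (c :: cs) m with
    | none => seq'
    | some rest => pvLoopA rest seq'
termination_by copia _ => copia.length
decreasing_by exact pv_remove?_length h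

def calcula_pontos_sequencia_alta (dados : List Int) : Int :=
  let sequencia_alta :=
    if 4 ≤ dados.length then
      let copia := dados.foldl (fun acc num => acc ++ [num]) []
      let seq := pvLoopA copia []
      (PySem.List.pyRange 0 ((seq.length : Int) - 4) 1).foldl
        (fun b i =>
          b || (PySem.List.pyGetD seq (i+1) 0 == PySem.List.pyGetD seq i 0 + 1
             && PySem.List.pyGetD seq (i+2) 0 == PySem.List.pyGetD seq i 0 + 2
             && PySem.List.pyGetD seq (i+3) 0 == PySem.List.pyGetD seq i 0 + 3
             && PySem.List.pyGetD seq (i+4) 0 == PySem.List.pyGetD seq i 0 + 4)) false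
    else false
  if sequencia_alta then 30 else 0

-- ===== PORT B =====
def calcula_pontos_sequencia_alta_alt (dados : List Int) : Int :=
  let s := PySem.Set.ofList dados
  if s.any (fun v => PySem.Set.contains s (v+1) && PySem.Set.contains s (v+2)
                  && PySem.Set.contains s (v+3) && PySem.Set.contains s (v+4))
  then 30 else 0

-- ===== PRECONDITION & SPEC =====
-- Pre_ excludes exactly the inputs where A raises ValueError: with len(dados) >= 4,
-- any element above the sentinel 10000 eventually leaves menor_num = 10000 not in the
-- list and 'copia_dados.remove(menor_num)' raises.
def Pre_calcula_pontos_sequencia_alta (dados : List Int) : Prop :=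
  dados.length < 4 ∨ ∀ x ∈ dados, x ≤ 10000
instance (dados : List Int) : Decidable (Pre_calcula_pontos_sequencia_alta dados) := by
  unfold Pre_calcula_pontos_sequencia_alta; infer_instance

def pvWitness_calcula_pontos_sequencia_alta : List Int := [5, 3, 4, 1, 2]

def Spec_calcula_pontos_sequencia_alta (dados : List Int) (out : Int) : Prop :=
  out = calcula_pontos_sequencia_alta_alt dados
instance (dados : List Int) (out : Int) : Decidable (Spec_calcula_pontos_sequencia_alta dados out) := by
  unfold Spec_calcula_pontos_sequencia_alta; infer_instance

-- ===== CLAIM (what is proved, stated in full; the proofs are below) =====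
def Claim_equal_calcula_pontos_sequencia_alta : Prop := ∀ (dados : List Int), Dom_calcula_pontos_sequencia_alta dados → Pre_calcula_pontos_sequencia_alta dados → Spec_calcula_pontos_sequencia_alta dados (calcula_pontos_sequencia_alta dados)

-- ===== LEMMAS AND PROOFS =====

-- "dados contains five consecutive values"
def pvConsec5 (l : List Int) : Prop :=
  ∃ v ∈ l, v + 1 ∈ l ∧ v + 2 ∈ l ∧ v + 3 ∈ l ∧ v + 4 ∈ l

-- the fold of A's inner minimum pass, generalized over the accumulator
theorem pvMenorFold_le (l : List Int) : ∀ m : Int,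
    l.foldl (fun m n => if n ≤ m then n else m) m ≤ m ∧
    ∀ y ∈ l, l.foldl (fun m n => if n ≤ m then n else m) m ≤ y := by
  induction l with
  | nil => simp
  | cons x xs ih =>
    intro m
    obtain ⟨h1, h2⟩ := ih (if x ≤ m then x else m)
    simp only [List.foldl_cons]
    refine ⟨by split_ifs at h1 ⊢ <;> omega, ?_⟩
    intro y hy
    rcases List.mem_cons.mp hy with rfl | hy
    · split_ifs at h1 ⊢ <;> omega
    · exact h2 y hy

theorem pvMenorFold_mem (l : List Int) : ∀ m : Int,
    l.foldl (fun m n => if n ≤ m then n else m) m = m ∨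
    l.foldl (fun m n => if n ≤ m then n else m) m ∈ l := by
  induction l with
  | nil => simp
  | cons x xs ih =>
    intro m
    rcases ih (if x ≤ m then x else m) with h | h
    · rw [List.foldl_cons, h]
      split_ifs with hx
      · exact Or.inr (List.mem_cons_self)
      · exact Or.inl rfl
    · exact Or.inr (List.mem_cons_of_mem _ h)

theorem pvMenor_le (l : List Int) : ∀ y ∈ l, pvMenor l ≤ y :=
  (pvMenorFold_le l 10000).2

theorem pvMenor_mem (l : List Int) (hne : l ≠ []) (h10 : ∀ x ∈ l, x ≤ 10000) :
    pvMenor l ∈ l := by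
  rcases pvMenorFold_mem l 10000 with h | h
  · obtain ⟨c, cs, rfl⟩ := List.exists_cons_of_ne_nil hne
    have h1 := (pvMenorFold_le (c :: cs) 10000).2 c List.mem_cons_self
    have h2 := h10 c List.mem_cons_self
    have hc : c = 10000 := by omega
    unfold pvMenor
    rw [h, ← hc]
    exact List.mem_cons_self
  · exact h

theorem pvLoopA_inv (copia seq : List Int) :
    (∀ x ∈ copia, x ≤ 10000) → seq.Pairwise (· < ·) →
    (∀ x ∈ seq, ∀ y ∈ copia, x ≤ y) →
    (pvLoopA copia seq).Pairwise (· < ·) ∧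
      ∀ x, (x ∈ pvLoopA copia seq ↔ x ∈ seq ∨ x ∈ copia) := by
  induction copia, seq using pvLoopA.induct with
  | case1 seq =>
    intro _ hsort _
    simpa [pvLoopA] using hsort
  | case2 c cs seq m h =>
    intro h10 _ _
    exfalso
    have hm : m ∈ c :: cs := pvMenor_mem _ (by simp) h10
    exact absurd hm ((PySem.List.remove?_eq_none_iff (c :: cs) m).mp h)
  | case3 c cs seq m seq' rest h ih =>
    intro h10 hsort hle
    have hm : m ∈ c :: cs := pvMenor_mem _ (by simp) h10
    have hrest : rest = (c :: cs).erase m := by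
      have := PySem.List.remove?_eq_some_erase (c :: cs) m hm
      rw [this] at h; exact (Option.some.injEq _ _ ▸ h.symm)
    have hperm : (c :: cs).Perm (m :: rest) := hrest ▸ List.perm_cons_erase hm
    have hmemc : ∀ x, x ∈ c :: cs ↔ x = m ∨ x ∈ rest := by
      intro x
      rw [hperm.mem_iff, List.mem_cons]
    have hsub : rest ⊆ c :: cs := fun x hx => (hmemc x).mpr (Or.inr hx)
    have hmle : ∀ y ∈ c :: cs, m ≤ y := pvMenor_le (c :: cs)
    have hseq'eq : seq' = if m ∈ seq then seq else seq ++ [m] := rfl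
    have hseq' : ∀ x, x ∈ seq' ↔ x ∈ seq ∨ x = m := by
      intro x
      rw [hseq'eq]
      split_ifs with hms
      · constructor
        · exact Or.inl
        · rintro (hx | rfl)
          · exact hx
          · exact hms
      · simp [List.mem_append]
    have h10' : ∀ x ∈ rest, x ≤ 10000 := fun x hx => h10 x (hsub hx)
    have hsort' : seq'.Pairwise (· < ·) := by
      rw [hseq'eq]
      split_ifs with hms
      · exact hsort
      · rw [List.pairwise_append]
        refine ⟨hsort, by simp, ?_⟩
        intro x hx y hy
        simp only [List.mem_singleton] at hy
        subst hy
        have h1 := hle x hx m hm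
        have h2 : x ≠ m := fun he => hms (he ▸ hx)
        omega
    have hle' : ∀ x ∈ seq', ∀ y ∈ rest, x ≤ y := by
      intro x hx y hy
      rcases (hseq' x).mp hx with hx | rfl
      · exact hle x hx y (hsub hy)
      · exact hmle y (hsub hy)
    obtain ⟨ih1, ih2⟩ := ih h10' hsort' hle'
    have hstep : pvLoopA (c :: cs) seq = pvLoopA rest seq' := by
      have h' : PySem.List.remove? (c :: cs) (pvMenor (c :: cs)) = some rest := h
      rw [pvLoopA]
      split
      · next heq => exact absurd (heq.symm.trans h') (by simp)
      · next r heq =>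
        cases h'.symm.trans heq
        rfl
    refine ⟨?_, ?_⟩
    · rw [hstep]; exact ih1
    · intro x
      rw [hstep, ih2 x, hseq' x, hmemc x]
      tauto

theorem pv_foldl_or (L : List Int) (p : Int → Bool) (b : Bool) :
    L.foldl (fun b i => b || p i) b = (b || L.any p) := by
  induction L generalizing b with
  | nil => simp
  | cons x xs ih => simp [List.foldl_cons, ih, Bool.or_assoc]

-- consecutive integer values sit at consecutive indices of a strictly sorted list
theorem pv_consec_idx {R : List Int} (hs : R.Pairwise (· < ·)) {a : Int}
    (ha : a ∈ R) (hb : a + 1 ∈ R) :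
    ∃ j, ∃ h : j + 1 < R.length, R[j]'(by omega) = a ∧ R[j + 1]'h = a + 1 := by
  have hs' := List.pairwise_iff_getElem.mp hs
  obtain ⟨i, hi, hia⟩ := List.mem_iff_getElem.mp ha
  obtain ⟨j, hj, hjb⟩ := List.mem_iff_getElem.mp hb
  have hij : i < j := by
    rcases lt_trichotomy i j with h | rfl | h
    · exact h
    · omega
    · have := hs' j i hj hi h; omega
  have hji : j = i + 1 := by
    by_contra hne
    have h1 : i + 1 < j := by omega
    have h2 : i + 1 < R.length := by omega
    have ha1 := hs' i (i+1) hi h2 (by omega)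
    have ha2 := hs' (i+1) j h2 hj h1
    omega
  subst hji
  exact ⟨i, hj, hia, hjb⟩

theorem pvB_eq_30_iff (dados : List Int) [Decidable (pvConsec5 dados)] :
    calcula_pontos_sequencia_alta_alt dados = if pvConsec5 dados then 30 else 0 := by
  unfold calcula_pontos_sequencia_alta_alt
  have key : ((PySem.Set.ofList dados).any
      (fun v => PySem.Set.contains (PySem.Set.ofList dados) (v+1)
             && PySem.Set.contains (PySem.Set.ofList dados) (v+2)
             && PySem.Set.contains (PySem.Set.ofList dados) (v+3)
             && PySem.Set.contains (PySem.Set.ofList dados) (v+4)) = true) ↔ pvConsec5 dados := by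
    simp [List.any_eq_true, PySem.Set.contains, PySem.Set.mem_ofList, pvConsec5, and_assoc]
  by_cases hc : pvConsec5 dados
  · rw [if_pos hc, if_pos (key.mpr hc)]
  · rw [if_neg hc, if_neg (fun h => hc (key.mp h))]

theorem pvConsec5_length {l : List Int} (h : pvConsec5 l) : 5 ≤ l.length := by
  obtain ⟨v, h0, h1, h2, h3, h4⟩ := h
  have hnd : ([v, v+1, v+2, v+3, v+4] : List Int).Nodup := by
    simp [List.nodup_cons]
  have hsub : ([v, v+1, v+2, v+3, v+4] : List Int) ⊆ l := by
    intro x hx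
    simp only [List.mem_cons, List.not_mem_nil, or_false] at hx
    rcases hx with rfl | rfl | rfl | rfl | rfl <;> assumption
  have := List.Subperm.length_le ((List.subperm_of_subset hnd hsub))
  simpa using this

-- strictly increasing lists have injective indexing
theorem pv_getElem_inj {R : List Int} (hs : R.Pairwise (· < ·))
    {i j : ℕ} (hi : i < R.length) (hj : j < R.length)
    (h : R[i] = R[j]) : i = j := by
  have hs' := List.pairwise_iff_getElem.mp hs
  rcases lt_trichotomy i j with hlt | rfl | hlt
  · have := hs' i j hi hj hlt; omega
  · rfl
  · have := hs' j i hj hi hlt; omega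

-- five consecutive members of a strictly sorted list occupy five consecutive slots
theorem pv_run_idx {R : List Int} (hs : R.Pairwise (· < ·)) {v : Int}
    (h0 : v ∈ R) (h1 : v + 1 ∈ R) (h2 : v + 2 ∈ R) (h3 : v + 3 ∈ R) (h4 : v + 4 ∈ R) :
    ∃ k, ∃ h : k + 4 < R.length,
      R[k]'(by omega) = v ∧ R[k+1]'(by omega) = v + 1 ∧ R[k+2]'(by omega) = v + 2 ∧
      R[k+3]'(by omega) = v + 3 ∧ R[k+4]'h = v + 4 := by
  have h2' : v + 1 + 1 ∈ R := by rw [show v + 1 + 1 = v + 2 by ring]; exact h2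
  have h3' : v + 2 + 1 ∈ R := by rw [show v + 2 + 1 = v + 3 by ring]; exact h3
  have h4' : v + 3 + 1 ∈ R := by rw [show v + 3 + 1 = v + 4 by ring]; exact h4
  obtain ⟨k, hk, e0, e1⟩ := pv_consec_idx hs h0 h1
  obtain ⟨a, ha, f0, f1⟩ := pv_consec_idx hs h1 h2'
  have hak : a = k + 1 := pv_getElem_inj hs (by omega) (by omega) (f0.trans e1.symm)
  subst hak
  rw [show v + 1 + 1 = v + 2 by ring] at f1
  obtain ⟨b, hb, g0, g1⟩ := pv_consec_idx hs h2 h3'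
  have hbk : b = k + 2 := pv_getElem_inj hs (by omega) (by omega) (g0.trans f1.symm)
  subst hbk
  rw [show v + 2 + 1 = v + 3 by ring] at g1
  obtain ⟨c, hc, i0, i1⟩ := pv_consec_idx hs h3 h4'
  have hck : c = k + 3 := pv_getElem_inj hs (by omega) (by omega) (i0.trans g1.symm)
  subst hck
  rw [show v + 3 + 1 = v + 4 by ring] at i1
  exact ⟨k, by omega, e0, e1, f1, g1, i1⟩

theorem pvA_eq (dados : List Int) [Decidable (pvConsec5 dados)]
    (hpre : Pre_calcula_pontos_sequencia_alta dados) :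
    calcula_pontos_sequencia_alta dados = if pvConsec5 dados then 30 else 0 := by
  unfold calcula_pontos_sequencia_alta
  by_cases hlen : 4 ≤ dados.length
  · have h10 : ∀ x ∈ dados, x ≤ 10000 := by
      rcases hpre with h | h
      · omega
      · exact h
    rw [if_pos hlen, PySem.List.foldl_append_singleton, List.nil_append]
    obtain ⟨hsort, hmem'⟩ := pvLoopA_inv dados [] h10 (by simp) (by simp)
    set R := pvLoopA dados [] with hR
    have hmem : ∀ x, x ∈ R ↔ x ∈ dados := by
      intro x; rw [hmem' x]; simp
    rw [pv_foldl_or, Bool.false_or]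
    have key : ((PySem.List.pyRange 0 ((R.length : Int) - 4) 1).any
        (fun i => PySem.List.pyGetD R (i+1) 0 == PySem.List.pyGetD R i 0 + 1
               && PySem.List.pyGetD R (i+2) 0 == PySem.List.pyGetD R i 0 + 2
               && PySem.List.pyGetD R (i+3) 0 == PySem.List.pyGetD R i 0 + 3
               && PySem.List.pyGetD R (i+4) 0 == PySem.List.pyGetD R i 0 + 4) = true)
        ↔ pvConsec5 dados := by
      rw [List.any_eq_true]
      constructor
      · rintro ⟨i, hiR, hcond⟩
        rw [PySem.List.mem_pyRange_one] at hiR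
        obtain ⟨hi0, hi4⟩ := hiR
        set k := i.toNat with hk
        have hik : i = (k : Int) := by omega
        have hklen : k + 4 < R.length := by omega
        simp only [Bool.and_eq_true, beq_iff_eq] at hcond
        rw [hik] at hcond
        rw [PySem.List.pyGetD_eq_getElem R 0 (by omega) (by omega),
            PySem.List.pyGetD_eq_getElem R 0 (by omega) (by omega),
            PySem.List.pyGetD_eq_getElem R 0 (by omega) (by omega),
            PySem.List.pyGetD_eq_getElem R 0 (by omega) (by omega),
            PySem.List.pyGetD_eq_getElem R 0 (by omega) (by omega)] at hcond
        simp only [show ((k:Int)+1).toNat = k+1 by omega, show ((k:Int)+2).toNat = k+2 by omega,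
          show ((k:Int)+3).toNat = k+3 by omega, show ((k:Int)+4).toNat = k+4 by omega,
          Int.toNat_natCast] at hcond
        obtain ⟨⟨⟨hc1, hc2⟩, hc3⟩, hc4⟩ := hcond
        refine ⟨R[k]'(by omega), (hmem _).mp (List.getElem_mem _), ?_, ?_, ?_, ?_⟩ <;>
          [rw [← hc1]; rw [← hc2]; rw [← hc3]; rw [← hc4]] <;>
          exact (hmem _).mp (List.getElem_mem _)
      · rintro ⟨v, h0, h1, h2, h3, h4⟩
        rw [← hmem] at h0 h1 h2 h3 h4
        obtain ⟨k, hklen, e0, e1, e2, e3, e4⟩ := pv_run_idx hsort h0 h1 h2 h3 h4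
        refine ⟨(k : Int), ?_, ?_⟩
        · rw [PySem.List.mem_pyRange_one]; omega
        · simp only [Bool.and_eq_true, beq_iff_eq]
          rw [PySem.List.pyGetD_eq_getElem R 0 (by omega) (by omega),
              PySem.List.pyGetD_eq_getElem R 0 (by omega) (by omega),
              PySem.List.pyGetD_eq_getElem R 0 (by omega) (by omega),
              PySem.List.pyGetD_eq_getElem R 0 (by omega) (by omega),
              PySem.List.pyGetD_eq_getElem R 0 (by omega) (by omega)]
          simp only [show ((k:Int)+1).toNat = k+1 by omega, show ((k:Int)+2).toNat = k+2 by omega,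
            show ((k:Int)+3).toNat = k+3 by omega, show ((k:Int)+4).toNat = k+4 by omega,
            Int.toNat_natCast]
          rw [e0, e1, e2, e3, e4]
          omega
    by_cases hc : pvConsec5 dados
    · rw [if_pos hc, if_pos (key.mpr hc)]
    · rw [if_neg hc, if_neg (fun h => hc (key.mp h))]
  · have hnc : ¬ pvConsec5 dados := fun hc => hlen (by have := pvConsec5_length hc; omega)
    rw [if_neg hlen, if_neg hnc]
    simp

-- ===== VERDICT (by name: the statement is the Claim_ definition above) =====
theorem calcula_pontos_sequencia_alta_spec : Claim_equal_calcula_pontos_sequencia_alta := by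
  intro dados _ hpre
  unfold Spec_calcula_pontos_sequencia_alta
  haveI : Decidable (pvConsec5 dados) := Classical.propDecidable _
  rw [pvA_eq dados hpre, pvB_eq_30_iff dados]
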